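-- pv_equiv track=rewrite | github.com/gspilinek/undergraduate_work | Experiment_V4.py | Max_of_matrix
-- ===== SOURCE A (Python) =====
-- def Max_of_matrix (mat):  # returns a list formatted as [maxvalue, row_location, col_location] and removes that entry from the matrix so we don't find it again
--      max = [mat[0] ,0]  # initialize max to a value in the matrix
--      flag = True
--      for x in range(1, len(mat)):
--          if(max[0] <mat[x]):  # if our max is smaller than a number we find
--              max[0] = mat[x]  # replace our old max
--              max[1 ] =x  # change old row location
--              flag = False
--      mat[max[1] ] =-1  # make the max location -1 so we won't consider it since all real numbers left will be >= 0
--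
--      return max  # return the list
-- ===== SOURCE B (Python) =====
-- def Max_of_matrix(mat):
--     # sort the index list by descending value (stable -> ties keep the smaller
--     # index first), so the head of the order is the leftmost maximum
--     order = sorted(range(len(mat)), key=lambda j: -mat[j])
--     i = order[0]
--     m = mat[i]
--     mat[i] = -1
--     return [m, i]
-- ===== Notes on version B (the rewrite author's own statement) =====
-- stated objective: alternative
-- what changed: Replaces A's single-pass running-max loop with index bookkeeping by a sort-based selection: sort the indices by descending value (stable sort keeps the leftmost among ties) and take the head of the sorted order.
import Mathlib
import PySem

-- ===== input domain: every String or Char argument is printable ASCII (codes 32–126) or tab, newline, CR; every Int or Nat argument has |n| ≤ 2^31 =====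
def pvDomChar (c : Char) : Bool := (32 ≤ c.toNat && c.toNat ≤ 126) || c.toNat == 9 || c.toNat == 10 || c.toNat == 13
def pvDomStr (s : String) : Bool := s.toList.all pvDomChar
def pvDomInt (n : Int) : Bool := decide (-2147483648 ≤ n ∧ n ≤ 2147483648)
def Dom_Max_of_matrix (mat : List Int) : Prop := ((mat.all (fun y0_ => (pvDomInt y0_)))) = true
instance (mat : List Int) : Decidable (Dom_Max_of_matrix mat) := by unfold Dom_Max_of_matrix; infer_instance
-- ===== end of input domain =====

-- B selects the leftmost maximum by stably sorting the index list on descending value and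
-- taking the head of the order, instead of A's running-max loop; return-value equivalence only:
-- both Pythons also set mat[i] = -1 in place at that same index.
-- A's local 'flag' is dead state never read by the return; it is not carried in the port.

-- ===== PORT A =====
-- pyGetD's default 0 is never reached under Pre_ (indices 0 and 1..len-1 are in range for a nonempty list).
def Max_of_matrix (mat : List Int) : List Int :=
  let mx := (PySem.List.pyRange 1 (mat.length : Int)).foldl
      (fun mx x =>
        if mx.1 < PySem.List.pyGetD mat x 0 then (PySem.List.pyGetD mat x 0, x) else mx)
      (PySem.List.pyGetD mat 0 0, (0 : Int))
  [mx.1, mx.2]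

-- ===== PORT B =====
-- sorted(range(len(mat)), key=lambda j: -mat[j]) is PySem.List.sorted on pyRange;
-- order[0] is pyGet? (its .getD 0 is never reached under Pre_: the order is nonempty).
def Max_of_matrix_alt (mat : List Int) : List Int :=
  let order := PySem.List.sorted (PySem.List.pyRange 0 (mat.length : Int))
      (fun j => -(PySem.List.pyGetD mat j 0))
  let i := (PySem.List.pyGet? order 0).getD 0
  let m := PySem.List.pyGetD mat i 0
  [m, i]

-- ===== PRECONDITION & SPEC =====
-- On the empty list both Pythons raise IndexError (A at mat[0], B at order[0]). Excluded.
def Pre_Max_of_matrix (mat : List Int) : Prop := mat ≠ []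
instance (mat : List Int) : Decidable (Pre_Max_of_matrix mat) := by unfold Pre_Max_of_matrix; infer_instance
def pvWitness_Max_of_matrix : List Int := [3, 7, 7, 2]

def Spec_Max_of_matrix (mat : List Int) (out : List Int) : Prop := out = Max_of_matrix_alt mat
instance (mat : List Int) (out : List Int) : Decidable (Spec_Max_of_matrix mat out) := by unfold Spec_Max_of_matrix; infer_instance

-- ===== CLAIM (what is proved, stated in full; the proofs are below) =====
def Claim_equal_Max_of_matrix : Prop := ∀ (mat : List Int), Dom_Max_of_matrix mat → Pre_Max_of_matrix mat → Spec_Max_of_matrix mat (Max_of_matrix mat)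

-- ===== LEMMAS AND PROOFS =====

-- the index-level running max both sides reduce to: keep x when mat[m] < mat[x]
def pvStep (mat : List Int) (m x : Int) : Int :=
  if PySem.List.pyGetD mat m 0 < PySem.List.pyGetD mat x 0 then x else m

-- A's pair-state fold is the index fold paired with its looked-up value.
lemma pvA_fold (mat : List Int) (l : List Int) : ∀ (m : Int),
    l.foldl (fun mx x =>
        if mx.1 < PySem.List.pyGetD mat x 0 then (PySem.List.pyGetD mat x 0, x) else mx)
      (PySem.List.pyGetD mat m 0, m)
    = (PySem.List.pyGetD mat (l.foldl (pvStep mat) m) 0, l.foldl (pvStep mat) m) := by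
  induction l with
  | nil => intro m; simp
  | cons x t ih =>
    intro m
    simp only [List.foldl_cons, pvStep]
    by_cases h : PySem.List.pyGetD mat m 0 < PySem.List.pyGetD mat x 0
    · simp only [h, if_true]; exact ih x
    · simp only [if_neg h]; exact ih m

-- the head of an insertion-sort fold with a strict 'before' test is the running strict-min of the key
lemma pvHead_foldl_insertBy (key : Int → Int) (l : List Int) : ∀ (h : Int) (t : List Int),
    ∃ t', l.foldl (fun acc x => PySem.List.insertBy (fun a b => decide (key a < key b)) x acc) (h :: t)
      = (l.foldl (fun m x => if key x < key m then x else m) h) :: t' := by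
  induction l with
  | nil => intro h t; exact ⟨t, rfl⟩
  | cons x l ih =>
    intro h t
    simp only [List.foldl_cons, PySem.List.insertBy]
    by_cases hx : key x < key h
    · simpa [hx] using ih x (h :: t)
    · simpa [hx] using ih h (PySem.List.insertBy (fun a b => decide (key a < key b)) x t)

-- ===== VERDICT (by name: the statement is the Claim_ definition above) =====
theorem Max_of_matrix_spec : Claim_equal_Max_of_matrix := by
  intro mat _hdom hpre
  unfold Spec_Max_of_matrix Max_of_matrix Max_of_matrix_alt
  have hn : (0 : Int) < (mat.length : Int) := by
    cases mat with
    | nil => exact absurd rfl hpre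
    | cons a t => exact_mod_cast t.length.succ_pos
  set key : Int → Int := fun j => -(PySem.List.pyGetD mat j 0) with hkey
  -- unfold the sort into its insertBy fold and peel the leading index 0
  have hrange : PySem.List.pyRange 0 (mat.length : Int)
      = 0 :: PySem.List.pyRange 1 (mat.length : Int) := by
    simpa using PySem.List.pyRange_one_cons hn
  obtain ⟨t', ht'⟩ := pvHead_foldl_insertBy key (PySem.List.pyRange 1 (mat.length : Int)) 0 []
  have hsorted : PySem.List.sorted (PySem.List.pyRange 0 (mat.length : Int)) key
      = ((PySem.List.pyRange 1 (mat.length : Int)).foldl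
          (fun m x => if key x < key m then x else m) 0) :: t' := by
    rw [PySem.List.sorted_eq_foldl_insertBy, hrange, List.foldl_cons]
    exact ht'
  -- the two index folds coincide: key x < key m ↔ mat[m] < mat[x]
  have hfold : (PySem.List.pyRange 1 (mat.length : Int)).foldl
      (fun m x => if key x < key m then x else m) 0
      = (PySem.List.pyRange 1 (mat.length : Int)).foldl (pvStep mat) 0 := by
    apply PySem.List.foldl_congr_mem
    intro m x _
    simp [hkey, pvStep, neg_lt_neg_iff]
  rw [hsorted]
  have hA := pvA_fold mat (PySem.List.pyRange 1 (mat.length : Int)) 0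
  simp [PySem.List.pyGet?, PySem.List.pyIdx?, hfold, hA]
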